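-- pv_equiv track=rewrite | github.com/Thejana-A/IS-4101-git | python_code/intersection_oct24.py | meeting_mode_maxsat_solver
-- ===== SOURCE A (Python) =====
-- def meeting_mode_maxsat_solver(meeting_locations):
--     meeting_locations = meeting_locations # Create a local dictionaty variable to assign values passed as parameter
--     optimum_meeting_mode = ""
--     optimum_meeting_slot = None
--
--     # Check for "onsite" possibility
--     for slot, locations in meeting_locations.items():
--         if all(loc == 1 for loc in locations):  # Check if all elements are 1
--             optimum_meeting_mode = "onsite"
--             optimum_meeting_slot = slot
--             break  # Exit the loop since we found an onsite meeting
--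
--     if optimum_meeting_mode == "":
--         # Check for "hybrid" possibility
--         highest_count_ones = 0
--         hybrid_slot = None
--
--         for slot, locations in meeting_locations.items():
--             count_ones = locations.count(1)
--             if count_ones > highest_count_ones:
--                 highest_count_ones = count_ones
--                 hybrid_slot = slot
--
--         if highest_count_ones >= 2:  # Check if the highest count of 1s is >= 2
--             optimum_meeting_mode = "hybrid"
--             optimum_meeting_slot = hybrid_slot
--
--     if optimum_meeting_mode == "":
--         # Find the item with the highest number of 2s
--         highest_count_twos = 0
--         twos_slot = None
--
--         for slot, locations in meeting_locations.items():
--             count_twos = locations.count(2)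
--             if count_twos > highest_count_twos:
--                 highest_count_twos = count_twos
--                 twos_slot = slot
--
--         optimum_meeting_mode = "online"  # Set to online since no previous conditions were met
--         optimum_meeting_slot = twos_slot  # Assign the slot with the highest number of 2s
--
--     return optimum_meeting_mode, optimum_meeting_slot, meeting_locations[optimum_meeting_slot]
-- ===== SOURCE B (Python) =====
-- def meeting_mode_maxsat_solver(meeting_locations):
--     # Single fused pass: track first all-ones slot and running best counts of 1s and 2s.
--     first_all = None
--     best_ones = (0, None)
--     best_twos = (0, None)
--     for slot, locations in meeting_locations.items():
--         if first_all is None and all(loc == 1 for loc in locations):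
--             first_all = slot
--         c1 = locations.count(1)
--         if c1 > best_ones[0]:
--             best_ones = (c1, slot)
--         c2 = locations.count(2)
--         if c2 > best_twos[0]:
--             best_twos = (c2, slot)
--     if first_all is not None:
--         mode, slot = "onsite", first_all
--     elif best_ones[0] >= 2:
--         mode, slot = "hybrid", best_ones[1]
--     else:
--         mode, slot = "online", best_twos[1]
--     return mode, slot, meeting_locations[slot]
-- ===== Notes on version B (the rewrite author's own statement) =====
-- stated objective: alternative
-- what changed: Replaced A's three separate passes over the dict (a break-on-first-all-ones search, then a max-count-of-1s scan with locations.count, then a max-count-of-2s scan) by one fused fold that maintains (first all-ones slot, running best 1s count, running best 2s count) and a single selection step afterwards.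
import Mathlib
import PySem

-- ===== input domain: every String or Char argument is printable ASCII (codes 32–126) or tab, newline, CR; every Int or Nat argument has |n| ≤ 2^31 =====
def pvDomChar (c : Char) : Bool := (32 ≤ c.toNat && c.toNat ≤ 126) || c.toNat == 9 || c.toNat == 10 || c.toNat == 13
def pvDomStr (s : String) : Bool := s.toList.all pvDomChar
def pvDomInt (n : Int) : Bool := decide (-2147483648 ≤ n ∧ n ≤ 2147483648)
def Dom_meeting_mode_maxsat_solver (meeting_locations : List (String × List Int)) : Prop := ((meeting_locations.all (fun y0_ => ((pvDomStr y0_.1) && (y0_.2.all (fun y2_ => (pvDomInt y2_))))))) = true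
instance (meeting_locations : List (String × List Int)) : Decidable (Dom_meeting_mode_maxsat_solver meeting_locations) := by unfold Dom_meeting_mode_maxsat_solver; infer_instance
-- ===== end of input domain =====

-- B fuses A's three scans over the dict into one fold with a selection step afterwards (alternative decomposition, same cost class).


-- ===== PORT A =====
-- A's first loop ('break' on the first all-ones slot): returns the (mode, slot) state when the loop exits.
def pvLoopOnsite : List (String × List Int) → String × Option String
  | [] => ("", none)
  | (slot, locations) :: rest =>
      if locations.all (fun loc => loc == 1) then ("onsite", some slot)
      else pvLoopOnsite rest

-- A's second loop body: running (highest_count_ones, hybrid_slot).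
def pvStepOnes (acc : Int × Option String) (p : String × List Int) : Int × Option String :=
  let count_ones : Int := PySem.List.count p.2 1
  if count_ones > acc.1 then (count_ones, some p.1) else acc

-- A's third loop body: running (highest_count_twos, twos_slot).
def pvStepTwos (acc : Int × Option String) (p : String × List Int) : Int × Option String :=
  let count_twos : Int := PySem.List.count p.2 2
  if count_twos > acc.1 then (count_twos, some p.1) else acc

def meeting_mode_maxsat_solver (meeting_locations : List (String × List Int)) : String × String × List Int :=
  let d := PySem.Dict.ofList meeting_locations
  let its := d.items
  let st1 := pvLoopOnsite its
  let st2 :=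
    if st1.1 == "" then
      let hb := its.foldl pvStepOnes (0, none)
      if hb.1 ≥ 2 then ("hybrid", hb.2) else st1
    else st1
  let st3 :=
    if st2.1 == "" then
      let tb := its.foldl pvStepTwos (0, none)
      ("online", tb.2)
    else st2
  -- meeting_locations[slot]: KeyError (slot = None or missing key) is excluded by Pre_; defaults are never reached there
  (st3.1, st3.2.getD "", (d.get? (st3.2.getD "")).getD [])

-- ===== PORT B =====
-- B's single fused loop body over state (first_all, best_ones, best_twos).
def pvStepB (acc : Option String × (Int × Option String) × (Int × Option String))
    (p : String × List Int) : Option String × (Int × Option String) × (Int × Option String) :=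
  let fa := match acc.1 with
    | some s => some s
    | none => if p.2.all (fun loc => loc == 1) then some p.1 else none
  let c1 : Int := PySem.List.count p.2 1
  let b1 := if c1 > acc.2.1.1 then (c1, some p.1) else acc.2.1
  let c2 : Int := PySem.List.count p.2 2
  let b2 := if c2 > acc.2.2.1 then (c2, some p.1) else acc.2.2
  (fa, b1, b2)

def meeting_mode_maxsat_solver_alt (meeting_locations : List (String × List Int)) : String × String × List Int :=
  let d := PySem.Dict.ofList meeting_locations
  let st := d.items.foldl pvStepB (none, (0, none), (0, none))
  let sel : String × Option String :=
    match st.1 with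
    | some s => ("onsite", some s)
    | none => if st.2.1.1 ≥ 2 then ("hybrid", st.2.1.2) else ("online", st.2.2.2)
  (sel.1, sel.2.getD "", (d.get? (sel.2.getD "")).getD [])

-- ===== PRECONDITION & SPEC =====
-- Pre_ excludes exactly the inputs on which A (and B alike) raises KeyError: the selected slot stays None
-- when no slot is all-ones, no slot has at least two 1s and no slot has any 2.
def Pre_meeting_mode_maxsat_solver (meeting_locations : List (String × List Int)) : Prop :=
  ((PySem.Dict.ofList meeting_locations).items.any (fun p =>
    p.2.all (fun loc => loc == 1) || decide (2 ≤ p.2.count 1) || decide (1 ≤ p.2.count 2))) = true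
instance (meeting_locations : List (String × List Int)) : Decidable (Pre_meeting_mode_maxsat_solver meeting_locations) := by unfold Pre_meeting_mode_maxsat_solver; infer_instance

def pvWitness_meeting_mode_maxsat_solver : (List (String × List Int)) := [("9am", [1, 1]), ("10am", [2, 0])]

def Spec_meeting_mode_maxsat_solver (meeting_locations : List (String × List Int)) (out : String × String × List Int) : Prop := out = meeting_mode_maxsat_solver_alt meeting_locations
instance (meeting_locations : List (String × List Int)) (out : String × String × List Int) : Decidable (Spec_meeting_mode_maxsat_solver meeting_locations out) := by unfold Spec_meeting_mode_maxsat_solver; infer_instance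

-- ===== CLAIM (what is proved, stated in full; the proofs are below) =====
def Claim_equal_meeting_mode_maxsat_solver : Prop := ∀ (meeting_locations : List (String × List Int)), Dom_meeting_mode_maxsat_solver meeting_locations → Pre_meeting_mode_maxsat_solver meeting_locations → Spec_meeting_mode_maxsat_solver meeting_locations (meeting_mode_maxsat_solver meeting_locations)

-- ===== LEMMAS AND PROOFS =====

-- B's fused fold computes A's three loop results at once.
theorem pv_fold_decomp (L : List (String × List Int)) (fa0 : Option String)
    (b1 b2 : Int × Option String) :
    L.foldl pvStepB (fa0, b1, b2) =
      ((match fa0 with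
        | some s => some s
        | none => (L.find? (fun p => p.2.all (fun loc => loc == 1))).map Prod.fst),
       L.foldl pvStepOnes b1, L.foldl pvStepTwos b2) := by
  induction L generalizing fa0 b1 b2 with
  | nil => cases fa0 <;> rfl
  | cons h t ih =>
    cases fa0 with
    | some s =>
      simp only [List.foldl_cons, pvStepB, pvStepOnes, pvStepTwos, ih]
    | none =>
      by_cases hall : h.2.all (fun loc => loc == 1)
      · simp only [List.foldl_cons, pvStepB, pvStepOnes, pvStepTwos, hall, if_true, ih,
          List.find?_cons, Option.map_some]
      · simp only [List.foldl_cons, pvStepB, pvStepOnes, pvStepTwos, hall,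
          Bool.false_eq_true, if_false, ih, List.find?_cons]

-- A's break loop in terms of the first all-ones slot.
theorem pv_loopOnsite_eq (L : List (String × List Int)) :
    pvLoopOnsite L =
      match (L.find? (fun p => p.2.all (fun loc => loc == 1))).map Prod.fst with
      | some s => ("onsite", some s)
      | none => ("", none) := by
  induction L with
  | nil => rfl
  | cons h t ih =>
    by_cases hall : h.2.all (fun loc => loc == 1)
    · simp [pvLoopOnsite, hall]
    · simp only [pvLoopOnsite, hall, Bool.false_eq_true, if_false, List.find?_cons, ih]

-- ===== VERDICT (by name: the statement is the Claim_ definition above) =====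
theorem meeting_mode_maxsat_solver_spec : Claim_equal_meeting_mode_maxsat_solver := by
  intro ml _ _
  unfold Spec_meeting_mode_maxsat_solver meeting_mode_maxsat_solver meeting_mode_maxsat_solver_alt
  simp only [pv_fold_decomp, pv_loopOnsite_eq]
  cases hfind : ((PySem.Dict.ofList ml).items.find? (fun p => p.2.all (fun loc => loc == 1))).map Prod.fst with
  | some s => simp
  | none =>
    by_cases hb : ((PySem.Dict.ofList ml).items.foldl pvStepOnes (0, none)).1 ≥ 2
    · simp [hb]
    · simp [hb]
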